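-- pv_equiv track=rewrite | github.com/ktchow1/hackerrank | journey to the moon.py | calculate_total_combo
-- ===== SOURCE A (Python) =====
-- def calculate_total_combo(clusters, num_unclustered_nodes) :
--     # one node from each cluster
--     count = 0
--     for x in range(len(clusters)) :
--         for y in range(x+1, len(clusters)) :
--             count = count + clusters[x]*clusters[y]
--
--     # one node from clustered, one node from unclustered
--     for x in clusters :
--         count = count + x*num_unclustered_nodes
--
--     # both nodes from unclustered
--     count = count + int(num_unclustered_nodes * (num_unclustered_nodes-1)/2) # int to prevent floating point
--     return count
-- ===== SOURCE B (Python) =====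
-- def calculate_total_combo(clusters, num_unclustered_nodes):
--     # one pass: pairwise-product sum = (S^2 - sum of squares) // 2, all integer arithmetic
--     s = 0
--     q = 0
--     for x in clusters:
--         s += x
--         q += x * x
--     n = num_unclustered_nodes
--     return (s * s - q) // 2 + s * n + n * (n - 1) // 2
-- ===== Notes on version B (the rewrite author's own statement) =====
-- stated objective: faster
-- what changed: Replaces the O(k^2) nested index loops over cluster pairs by the one-pass identity sum_{x<y} a_x a_y = (S^2 - sum a_x^2)/2, and computes the unclustered-pair term with exact integer floor division instead of float division.
-- intended difference: When num_unclustered_nodes*(num_unclustered_nodes-1) >= 2^53 and is not a multiple of the IEEE-double ulp at its magnitude (|n| >= about 1.3e8), A's int(n*(n-1)/2) goes through a rounded float and returns a value off by up to half an ulp (e.g. n=2147483647: A gives 2305843005992468480), while B returns the exact pair count n*(n-1)//2 (2305843005992468481), which is the intended value. — e.g. on calculate_total_combo([], 2147483647): A returns 2305843005992468480, B returns 2305843005992468481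
import Mathlib
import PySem

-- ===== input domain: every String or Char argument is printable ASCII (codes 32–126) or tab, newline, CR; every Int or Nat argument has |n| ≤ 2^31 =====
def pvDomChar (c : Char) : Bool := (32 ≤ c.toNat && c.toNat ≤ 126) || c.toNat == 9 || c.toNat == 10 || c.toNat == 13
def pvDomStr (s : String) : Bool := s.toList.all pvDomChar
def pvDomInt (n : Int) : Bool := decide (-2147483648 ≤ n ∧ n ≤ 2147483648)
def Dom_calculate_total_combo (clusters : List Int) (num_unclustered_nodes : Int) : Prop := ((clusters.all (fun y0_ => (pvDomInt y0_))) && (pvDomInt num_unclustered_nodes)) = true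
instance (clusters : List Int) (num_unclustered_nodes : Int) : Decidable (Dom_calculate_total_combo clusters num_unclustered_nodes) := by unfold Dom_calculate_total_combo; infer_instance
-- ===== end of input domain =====

-- B replaces A's O(k^2) nested pair loops by the one-pass identity (S^2 - Σx^2)/2 and the
-- float-division pair term by exact integer floor division (objective: faster, asymptotic).


-- ===== PORT A =====
-- Hand-port of Python's `int(m / 2)` for an int m with 0 ≤ m < 2^63 (float true division,
-- then truncation).  Exact on that range: float(m) is m rounded half-to-even to the ulp
-- 2^(bit_length m - 53); dividing that float by 2 is exact and integer-valued (m is even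
-- there or the ulp is ≥ 2), so int() truncates nothing.
def pyIntTrueDivHalf (m : Int) : Int :=
  let e : Nat := PySem.Int.bitLength m - 53
  if e = 0 then m / 2
  else
    let p : Int := 2 ^ e
    let q := m / p
    let r := m % p
    let half := p / 2
    let q' := if r < half then q
              else if half < r then q + 1
              else if q % 2 = 0 then q else q + 1
    q' * p / 2

-- indices drawn from range(len) are always in range, so pyGetD's default 0 is never used
def calculate_total_combo (clusters : List Int) (num_unclustered_nodes : Int) : Int :=
  let count : Int :=
    (PySem.List.pyRange 0 (PySem.List.len clusters) 1).foldl
      (fun count x =>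
        (PySem.List.pyRange (x + 1) (PySem.List.len clusters) 1).foldl
          (fun count y =>
            count + PySem.List.pyGetD clusters x 0 * PySem.List.pyGetD clusters y 0)
          count)
      0
  let count := clusters.foldl (fun count x => count + x * num_unclustered_nodes) count
  count + pyIntTrueDivHalf (num_unclustered_nodes * (num_unclustered_nodes - 1))

-- ===== PORT B =====
def calculate_total_combo_alt (clusters : List Int) (num_unclustered_nodes : Int) : Int :=
  let sq := clusters.foldl (fun acc x => (acc.1 + x, acc.2 + x * x)) ((0 : Int), (0 : Int))
  PySem.Int.floordiv (sq.1 * sq.1 - sq.2) 2 + sq.1 * num_unclustered_nodes +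
    PySem.Int.floordiv (num_unclustered_nodes * (num_unclustered_nodes - 1)) 2

-- ===== PRECONDITION & SPEC =====
-- When n*(n-1) ≥ 2^53 and is not a multiple of the IEEE-double ulp at its magnitude
-- (|n| ≥ about 1.3e8), A's int(n*(n-1)/2) goes through a rounded float and returns a value
-- off by up to half an ulp, while B returns the exact pair count n*(n-1)//2, the intended value.
def D_calculate_total_combo (clusters : List Int) (num_unclustered_nodes : Int) : Prop :=
  2 ^ 53 ≤ num_unclustered_nodes * (num_unclustered_nodes - 1) ∧
    ¬ ((2 : Int) ^ (PySem.Int.bitLength (num_unclustered_nodes * (num_unclustered_nodes - 1)) - 53) ∣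
        num_unclustered_nodes * (num_unclustered_nodes - 1))
instance (clusters : List Int) (num_unclustered_nodes : Int) : Decidable (D_calculate_total_combo clusters num_unclustered_nodes) := by unfold D_calculate_total_combo; infer_instance

def Spec_calculate_total_combo (clusters : List Int) (num_unclustered_nodes : Int) (out : Int) : Prop := ¬ D_calculate_total_combo clusters num_unclustered_nodes → out = calculate_total_combo_alt clusters num_unclustered_nodes
instance (clusters : List Int) (num_unclustered_nodes : Int) (out : Int) : Decidable (Spec_calculate_total_combo clusters num_unclustered_nodes out) := by unfold Spec_calculate_total_combo; infer_instance

def pvDiffWitness_calculate_total_combo : List Int × Int := ([], 2147483647)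
def pvDiffWitnessOut_calculate_total_combo : Int × Int := (2305843005992468480, 2305843005992468481)

-- ===== CLAIM (what is proved, stated in full; the proofs are below) =====
def Claim_unchanged_calculate_total_combo : Prop := ∀ (clusters : List Int) (num_unclustered_nodes : Int), Dom_calculate_total_combo clusters num_unclustered_nodes → Spec_calculate_total_combo clusters num_unclustered_nodes (calculate_total_combo clusters num_unclustered_nodes)
def Claim_changed_calculate_total_combo : Prop := Dom_calculate_total_combo (pvDiffWitness_calculate_total_combo.1) (pvDiffWitness_calculate_total_combo.2) ∧ D_calculate_total_combo (pvDiffWitness_calculate_total_combo.1) (pvDiffWitness_calculate_total_combo.2) ∧ calculate_total_combo (pvDiffWitness_calculate_total_combo.1) (pvDiffWitness_calculate_total_combo.2) = pvDiffWitnessOut_calculate_total_combo.1 ∧ calculate_total_combo_alt (pvDiffWitness_calculate_total_combo.1) (pvDiffWitness_calculate_total_combo.2) = pvDiffWitnessOut_calculate_total_combo.2 ∧ pvDiffWitnessOut_calculate_total_combo.1 ≠ pvDiffWitnessOut_calculate_total_combo.2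
def Claim_exact_calculate_total_combo : Prop := ∀ (clusters : List Int) (num_unclustered_nodes : Int), Dom_calculate_total_combo clusters num_unclustered_nodes → D_calculate_total_combo clusters num_unclustered_nodes → calculate_total_combo clusters num_unclustered_nodes ≠ calculate_total_combo_alt clusters num_unclustered_nodes

-- ===== LEMMAS AND PROOFS =====

/-- Sum of products over ordered pairs, recursively. -/
def pvPairs : List Int → Int
  | [] => 0
  | x :: t => x * t.sum + pvPairs t

theorem pv_sum_map_mul_left (a : Int) (l : List Int) :
    (l.map (fun v => a * v)).sum = a * l.sum := by
  induction l with
  | nil => simp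
  | cons x t ih => simp [ih]; ring

theorem pv_sum_map_mul_right (a : Int) (l : List Int) :
    (l.map (fun v => v * a)).sum = l.sum * a := by
  induction l with
  | nil => simp
  | cons x t ih => simp [ih]; ring

theorem pv_range_sum_eq_pvPairs (xs : List Int) :
    ((List.range xs.length).map (fun k => xs.getD k 0 * (xs.drop (k + 1)).sum)).sum
      = pvPairs xs := by
  induction xs with
  | nil => simp [pvPairs]
  | cons x t ih =>
    rw [List.length_cons, List.range_succ_eq_map]
    simp only [List.map_cons, List.map_map, List.sum_cons]
    simpa [pvPairs] using congrArg (fun s => x * t.sum + s) ih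

theorem pv_A_pair_loop (xs : List Int) :
    (PySem.List.pyRange 0 (PySem.List.len xs) 1).foldl
      (fun count x =>
        (PySem.List.pyRange (x + 1) (PySem.List.len xs) 1).foldl
          (fun count y =>
            count + PySem.List.pyGetD xs x 0 * PySem.List.pyGetD xs y 0)
          count)
      0 = pvPairs xs := by
  have hinner : ∀ (c x : Int), 0 ≤ x →
      (PySem.List.pyRange (x + 1) (PySem.List.len xs) 1).foldl
        (fun count y => count + PySem.List.pyGetD xs x 0 * PySem.List.pyGetD xs y 0) c
      = c + PySem.List.pyGetD xs x 0 * (xs.drop (x + 1).toNat).sum := by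
    intro c x hx
    rw [PySem.List.foldl_pyRange_pyGetD xs 0
        (fun count v => count + PySem.List.pyGetD xs x 0 * v) c (by omega : (0:Int) ≤ x + 1)]
    rw [PySem.List.foldl_add (xs.drop (x + 1).toNat)
        (fun v => PySem.List.pyGetD xs x 0 * v) c]
    rw [pv_sum_map_mul_left]
  rw [PySem.List.foldl_congr_mem (PySem.List.pyRange 0 (PySem.List.len xs) 1) _
      (fun (c x : Int) => c + PySem.List.pyGetD xs x 0 * (xs.drop (x + 1).toNat).sum) 0
      (by intro acc x hx
          exact hinner acc x (PySem.List.mem_pyRange_one.mp hx).1)]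
  rw [PySem.List.foldl_add (PySem.List.pyRange 0 (PySem.List.len xs) 1)
      (fun x : Int => PySem.List.pyGetD xs x 0 * (xs.drop (x + 1).toNat).sum) 0]
  rw [PySem.List.pyRange_one, List.map_map]
  have hlen : ((PySem.List.len xs - 0).toNat) = xs.length := by simp
  rw [hlen, zero_add, ← pv_range_sum_eq_pvPairs xs]
  congr 1
  apply List.map_congr_left
  intro k hk
  rw [List.mem_range] at hk
  show PySem.List.pyGetD xs (0 + (k : Int)) 0 * (xs.drop ((0 + (k : Int)) + 1).toNat).sum
      = xs.getD k 0 * (xs.drop (k + 1)).sum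
  rw [zero_add, PySem.List.pyGetD_natCast xs k 0]
  have h2 : (((k : Int)) + 1).toNat = k + 1 := by omega
  rw [h2]

theorem pv_two_pvPairs (xs : List Int) :
    2 * pvPairs xs = xs.sum * xs.sum - (xs.map (fun x => x * x)).sum := by
  induction xs with
  | nil => simp [pvPairs]
  | cons x t ih => simp [pvPairs, List.sum_cons]; ring_nf; ring_nf at ih; omega

theorem pv_B_fold (xs : List Int) :
    xs.foldl (fun acc x => (acc.1 + x, acc.2 + x * x)) ((0 : Int), (0 : Int))
      = (xs.sum, (xs.map (fun x => x * x)).sum) := by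
  rw [PySem.List.foldl_prod_mk (f := fun (s x : Int) => s + x)
      (g := fun (s x : Int) => s + x * x)]
  have h1 : xs.foldl (fun (s x : Int) => s + x) 0 = xs.sum := by
    rw [PySem.List.foldl_add xs (fun x : Int => x) 0]; simp
  have h2 : xs.foldl (fun (s x : Int) => s + x * x) 0 = (xs.map (fun x => x * x)).sum := by
    rw [PySem.List.foldl_add xs (fun x : Int => x * x) 0]; simp
  rw [h1, h2]

theorem pv_floordiv_double (k : Int) : PySem.Int.floordiv (2 * k) 2 = k := by
  rw [PySem.Int.floordiv_eq_ediv_of_pos (by omega)]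
  omega

theorem pv_second_loop (xs : List Int) (n c : Int) :
    xs.foldl (fun count x => count + x * n) c = c + xs.sum * n := by
  rw [PySem.List.foldl_add xs (fun x : Int => x * n) c, pv_sum_map_mul_right]

theorem pv_m_nonneg (n : Int) : 0 ≤ n * (n - 1) := by
  rcases lt_or_ge n 1 with h | h
  · nlinarith
  · exact mul_nonneg (by omega) (by omega)

theorem pv_m_even (n : Int) : Even (n * (n - 1)) := by
  have := Int.even_mul_succ_self (n - 1)
  simpa [mul_comm] using this

theorem pv_bl_dvd_of_small (m : Int) (hm : 0 ≤ m) (h : m < 2 ^ 53) :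
    (2 : Int) ^ (PySem.Int.bitLength m - 53) ∣ m := by
  have hbl : PySem.Int.bitLength m ≤ 53 := by
    by_contra hgt
    push_neg at hgt
    rcases eq_or_ne m 0 with rfl | hne
    · simp [PySem.Int.bitLength_zero] at hgt
    · have h2 := PySem.Int.two_pow_bitLength_le m hne
      have : (2 : Nat) ^ 53 ≤ m.natAbs := by
        calc (2 : Nat) ^ 53 ≤ 2 ^ (PySem.Int.bitLength m - 1) :=
              Nat.pow_le_pow_right (by omega) (by omega)
          _ ≤ m.natAbs := h2
      have : (2 : Int) ^ 53 ≤ m := by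
        have := Int.natAbs_eq m
        have h53 : ((2 : Nat) ^ 53 : Int) = (2 : Int) ^ 53 := by norm_num
        omega
      omega
  have : PySem.Int.bitLength m - 53 = 0 := by omega
  simp [this]

theorem pv_half_exact (m : Int) (_hm : 0 ≤ m) (he : Even m)
    (hdvd : (2 : Int) ^ (PySem.Int.bitLength m - 53) ∣ m) :
    pyIntTrueDivHalf m = PySem.Int.floordiv m 2 := by
  obtain ⟨a, ha⟩ := he
  unfold pyIntTrueDivHalf
  rw [PySem.Int.floordiv_eq_ediv_of_pos (by omega : (0:Int) < 2)]
  by_cases h0 : PySem.Int.bitLength m - 53 = 0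
  · simp [h0]
  · simp only [h0, if_false]
    set e := PySem.Int.bitLength m - 53 with hedef
    have hp : (0 : Int) < 2 ^ e := by positivity
    have hr : m % (2 : Int) ^ e = 0 := Int.emod_eq_zero_of_dvd hdvd
    have hhalf : (0 : Int) < 2 ^ e / 2 := by
      have : (2 : Int) ^ e = 2 ^ (e - 1) * 2 := by
        rw [← pow_succ]; congr 1; omega
      rw [this]
      have : (2 : Int) ^ (e - 1) * 2 / 2 = 2 ^ (e - 1) := by omega
      rw [this]; positivity
    simp only [hr, hhalf, if_true]
    have : m / 2 ^ e * 2 ^ e = m := Int.ediv_mul_cancel hdvd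
    rw [this]

theorem pv_half_inexact (m : Int) (_hm : 0 ≤ m) (he : Even m)
    (_hbig : 2 ^ 53 ≤ m) (hnd : ¬ (2 : Int) ^ (PySem.Int.bitLength m - 53) ∣ m) :
    pyIntTrueDivHalf m ≠ PySem.Int.floordiv m 2 := by
  obtain ⟨a, ha⟩ := he
  have h0 : PySem.Int.bitLength m - 53 ≠ 0 := by
    intro h
    exact hnd (by simp [h])
  unfold pyIntTrueDivHalf
  rw [PySem.Int.floordiv_eq_ediv_of_pos (by omega : (0:Int) < 2)]
  simp only [h0, if_false]
  set e := PySem.Int.bitLength m - 53 with hedef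
  have he1 : 1 ≤ e := by omega
  have hp : (0 : Int) < 2 ^ e := by positivity
  have hsplit : (2 : Int) ^ e = 2 ^ (e - 1) * 2 := by
    rw [← pow_succ]; congr 1; omega
  have h2p : (2 : Int) ∣ 2 ^ e := ⟨2 ^ (e - 1), by rw [hsplit]; ring⟩
  have hqp := Int.mul_ediv_add_emod m (2 ^ e)
  have hrlo : 0 ≤ m % 2 ^ e := Int.emod_nonneg m (by omega)
  have hrhi : m % 2 ^ e < 2 ^ e := Int.emod_lt_of_pos m hp
  have hrne : m % 2 ^ e ≠ 0 := fun h => hnd (Int.dvd_of_emod_eq_zero h)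
  -- whichever branch is taken, the rounded value q' * 2^e is an even number ≠ m
  have key : ∀ q' : Int, (q' = m / 2 ^ e ∨ q' = m / 2 ^ e + 1) →
      q' * 2 ^ e / 2 ≠ m / 2 := by
    intro q' hq' heq
    obtain ⟨b, hb⟩ : (2 : Int) ∣ q' * 2 ^ e := Dvd.dvd.mul_left h2p q'
    have hbval : q' * 2 ^ e / 2 = b := by rw [hb]; omega
    have haval : m / 2 = a := by omega
    rw [hbval, haval] at heq
    subst heq
    have hA : q' * 2 ^ e = 2 ^ e * (m / 2 ^ e) ∨
        q' * 2 ^ e = 2 ^ e * (m / 2 ^ e) + 2 ^ e := by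
      rcases hq' with rfl | rfl
      · left; ring
      · right; ring
    omega
  split_ifs <;> [exact key _ (Or.inl rfl); exact key _ (Or.inr rfl);
                 exact key _ (Or.inl rfl); exact key _ (Or.inr rfl)]

theorem pv_A_closed (xs : List Int) (n : Int) :
    calculate_total_combo xs n
      = pvPairs xs + xs.sum * n + pyIntTrueDivHalf (n * (n - 1)) := by
  simp only [calculate_total_combo]
  rw [pv_A_pair_loop, pv_second_loop]

theorem pv_B_closed (xs : List Int) (n : Int) :
    calculate_total_combo_alt xs n
      = pvPairs xs + xs.sum * n + PySem.Int.floordiv (n * (n - 1)) 2 := by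
  simp only [calculate_total_combo_alt]
  rw [pv_B_fold]
  have h : xs.sum * xs.sum - (xs.map (fun x => x * x)).sum = 2 * pvPairs xs :=
    (pv_two_pvPairs xs).symm
  simp only [h, pv_floordiv_double]

-- ===== VERDICT (by name: the statement is the Claim_ definition above) =====
theorem calculate_total_combo_spec : Claim_unchanged_calculate_total_combo := by
  intro clusters n _ hD
  rw [pv_A_closed, pv_B_closed]
  have hdvd : (2 : Int) ^ (PySem.Int.bitLength (n * (n - 1)) - 53) ∣ n * (n - 1) := by
    unfold D_calculate_total_combo at hD
    push_neg at hD
    rcases lt_or_ge (n * (n - 1)) (2 ^ 53) with hs | hb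
    · exact pv_bl_dvd_of_small _ (pv_m_nonneg n) hs
    · exact hD hb
  rw [pv_half_exact _ (pv_m_nonneg n) (pv_m_even n) hdvd]

set_option maxRecDepth 8192 in
theorem calculate_total_combo_changed : Claim_changed_calculate_total_combo := by
  unfold Claim_changed_calculate_total_combo; decide

theorem calculate_total_combo_tight : Claim_exact_calculate_total_combo := by
  intro clusters n _ hD
  obtain ⟨hbig, hnd⟩ := hD
  rw [pv_A_closed, pv_B_closed]
  intro h
  exact pv_half_inexact _ (pv_m_nonneg n) (pv_m_even n) hbig hnd (by omega)
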